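-- pv_equiv track=rewrite | github.com/wanglingxiang1298/CodeBC | CodeBC-data processing/train data/slither_data4VD_insafe.py | detection
-- ===== SOURCE A (Python) =====
-- def detection(data):
--     lines = data.split('\n')
--     line_iter1 = iter(lines)
--     for line in line_iter1:
--         line = line.strip()
--         if line.startswith('pragma'):
--             try:
--                 while True:
--                     line = next(line_iter1).strip()
--                     if line.startswith('pragma'):
--                         return 1
--             except StopIteration:
--                 break
--     return 0
-- ===== SOURCE B (Python) =====
-- def detection(data):
--     # Single character-level state machine over the raw string: no split(), no
--     # per-line strip()/startswith().  j = number of characters of "pragma"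
--     # matched on the current line (-1 = this line can no longer match).
--     found = 0
--     j = 0
--     for c in data:
--         if c == '\n':
--             j = 0
--         elif j < 0:
--             pass
--         elif j == 0 and c.isspace():
--             pass
--         elif j < 6 and c == 'pragma'[j]:
--             j += 1
--             if j == 6:
--                 found += 1
--                 if found == 2:
--                     return 1
--                 j = -1
--         else:
--             j = -1
--     return 0
-- ===== Notes on version B (the rewrite author's own statement) =====
-- stated objective: alternative
-- what changed: Replaced A's split('\n') plus per-line strip()/startswith() nested find-first-then-find-second iterator loops with a single character-level state machine over the raw string that tracks how many characters of 'pragma' are matched on the current line and how many pragma lines have been seen.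
import Mathlib
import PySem

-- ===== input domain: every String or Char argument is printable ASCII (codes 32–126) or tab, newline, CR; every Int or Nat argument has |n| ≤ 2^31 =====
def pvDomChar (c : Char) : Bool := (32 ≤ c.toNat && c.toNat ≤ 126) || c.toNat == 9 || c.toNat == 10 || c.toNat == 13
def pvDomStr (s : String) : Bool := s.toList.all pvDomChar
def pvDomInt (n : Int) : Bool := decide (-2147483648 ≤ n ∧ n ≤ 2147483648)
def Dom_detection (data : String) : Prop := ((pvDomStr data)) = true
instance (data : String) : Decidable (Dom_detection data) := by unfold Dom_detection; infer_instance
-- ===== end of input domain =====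

-- B replaces A's split-into-lines + per-line strip/startswith nested-iterator search by a single
-- character-level state machine over the raw string (no split, no strip); same cost, different algorithm.


-- ===== PORT A =====
-- helper: "line.strip().startswith('pragma')"
def pvIsPragma (l : List Char) : Bool := PySem.Chars.startswith (PySem.Chars.strip l) "pragma".toList

-- inner while-loop of A: scan the remaining lines for a second pragma line
def pvFindSecond : List (List Char) → Int
  | [] => 0
  | l :: rest => if pvIsPragma l then 1 else pvFindSecond rest

-- outer for-loop of A: find the first pragma line, then hand the rest to the inner loop
def pvFindFirst : List (List Char) → Int
  | [] => 0
  | l :: rest => if pvIsPragma l then pvFindSecond rest else pvFindFirst rest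

def detection (data : String) : Int :=
  pvFindFirst (PySem.Chars.splitOn data.toList ['\n'])

-- ===== PORT B =====
-- B: a character-level state machine; found = pragma lines seen so far, j = matched chars of
-- "pragma" on the current line (-1 = the current line can no longer match).
def pvPat : List Char := ['p', 'r', 'a', 'g', 'm', 'a']

def pvScan : List Char → Int → Int → Int
  | [], _, _ => 0
  | c :: rest, found, j =>
    if c = '\n' then pvScan rest found 0
    else if j < 0 then pvScan rest found j
    else if j = 0 ∧ PySem.Chars.isspace c then pvScan rest found j
    else if j < 6 ∧ PySem.List.pyGet? pvPat j = some c then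
      (if j + 1 = 6 then
        (if found + 1 = 2 then 1 else pvScan rest (found + 1) (-1))
      else pvScan rest found (j + 1))
    else pvScan rest found (-1)

def detection_alt (data : String) : Int := pvScan data.toList 0 0

-- ===== PRECONDITION & SPEC =====
def Spec_detection (data : String) (out : Int) : Prop := out = detection_alt data
instance (data : String) (out : Int) : Decidable (Spec_detection data out) := by unfold Spec_detection; infer_instance

-- ===== CLAIM (what is proved, stated in full; the proofs are below) =====
def Claim_equal_detection : Prop := ∀ (data : String), Dom_detection data → Spec_detection data (detection data)

-- ===== LEMMAS AND PROOFS =====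

-- the list of lines of cs (split at '\n'), as a plain structural recursion
def pvLines : List Char → List (List Char)
  | [] => [[]]
  | c :: cs =>
    if c = '\n' then [] :: pvLines cs
    else match pvLines cs with
      | [] => [[c]]
      | l :: ls => (c :: l) :: ls

theorem pvLines_ne_nil (cs : List Char) : pvLines cs ≠ [] := by
  cases cs with
  | nil => simp [pvLines]
  | cons c cs =>
    simp only [pvLines]
    split <;> [simp; (split <;> simp)]

-- one-step equations for PySem.Chars.splitOn.go at sep = ['\n']
theorem pvGo_nil (f : Nat) (cur : List Char) (acc : List (List Char)) :
    PySem.Chars.splitOn.go ['\n'] (f+1) [] cur acc = (cur.reverse :: acc).reverse := by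
  rw [PySem.Chars.splitOn.go]; simp

theorem pvGo_nl (f : Nat) (rest cur : List Char) (acc : List (List Char)) :
    PySem.Chars.splitOn.go ['\n'] (f+1) ('\n'::rest) cur acc
      = PySem.Chars.splitOn.go ['\n'] f rest [] (cur.reverse :: acc) := by
  rw [PySem.Chars.splitOn.go]; simp [List.isPrefixOf]

theorem pvGo_other (f : Nat) (c : Char) (rest cur : List Char) (acc : List (List Char)) (h : c ≠ '\n') :
    PySem.Chars.splitOn.go ['\n'] (f+1) (c::rest) cur acc
      = PySem.Chars.splitOn.go ['\n'] f rest (c :: cur) acc := by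
  rw [PySem.Chars.splitOn.go]
  simp only [List.isPrefixOf, beq_iff_eq, Bool.and_true]
  rw [if_neg]
  simp [Ne.symm h]

-- splitOn.go computes pvLines whenever the fuel suffices
theorem pvGo_eq (l : List Char) : ∀ (cur : List Char) (acc : List (List Char)) (fuel : Nat),
    l.length + 1 ≤ fuel →
    PySem.Chars.splitOn.go ['\n'] fuel l cur acc =
      acc.reverse ++ ((cur.reverse ++ (pvLines l).headI) :: (pvLines l).tail) := by
  induction l with
  | nil =>
    intro cur acc fuel h
    obtain ⟨f, rfl⟩ : ∃ f, fuel = f + 1 := ⟨fuel - 1, by omega⟩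
    rw [pvGo_nil]
    simp [pvLines]
  | cons c rest ih =>
    intro cur acc fuel h
    obtain ⟨f, rfl⟩ : ∃ f, fuel = f + 1 := ⟨fuel - 1, by omega⟩
    obtain ⟨L, Ls, hLL⟩ : ∃ L Ls, pvLines rest = L :: Ls := by
      cases hr : pvLines rest with
      | nil => exact absurd hr (pvLines_ne_nil rest)
      | cons L Ls => exact ⟨L, Ls, rfl⟩
    simp only [List.length_cons] at h
    by_cases hc : c = '\n'
    · subst hc
      rw [pvGo_nl, ih [] (cur.reverse :: acc) f (by omega)]
      simp [pvLines, hLL]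
    · rw [pvGo_other f c rest cur acc hc, ih (c :: cur) acc f (by omega)]
      simp [pvLines, hc, hLL]

theorem pvSplitOn_eq (cs : List Char) : PySem.Chars.splitOn cs ['\n'] = pvLines cs := by
  obtain ⟨L, Ls, hLL⟩ : ∃ L Ls, pvLines cs = L :: Ls := by
    cases hr : pvLines cs with
    | nil => exact absurd hr (pvLines_ne_nil cs)
    | cons L Ls => exact ⟨L, Ls, rfl⟩
  rw [PySem.Chars.splitOn, pvGo_eq cs [] [] (cs.length + 1) (le_refl _), hLL]
  simp

-- the per-line matcher: what pvScan does to one line from state j (true = a completion occurs)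
def pvLineDone : Int → List Char → Bool
  | _, [] => false
  | j, c :: rest =>
    if j < 0 then false
    else if j = 0 ∧ PySem.Chars.isspace c then pvLineDone j rest
    else if j < 6 ∧ PySem.List.pyGet? pvPat j = some c then
      (if j + 1 = 6 then true else pvLineDone (j + 1) rest)
    else false

theorem pvLineDone_neg (l : List Char) (j : Int) (hj : j < 0) : pvLineDone j l = false := by
  cases l with
  | nil => rfl
  | cons c rest => simp [pvLineDone, hj]

theorem pvLineDone_mid (l : List Char) : ∀ (j : Int), 1 ≤ j → j < 6 →
    pvLineDone j l = (pvPat.drop j.toNat).isPrefixOf l := by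
  induction l with
  | nil =>
    intro j h1 h6
    interval_cases j <;> simp [pvLineDone, pvPat]
  | cons c rest ih =>
    intro j h1 h6
    interval_cases j
    · -- j = 1
      have hg : PySem.List.pyGet? pvPat (1 : Int) = some 'r' := by decide
      by_cases hcc : c = 'r'
      · subst hcc
        rw [pvLineDone, if_neg (by norm_num), if_neg (by norm_num),
          if_pos ⟨by norm_num, by rw [hg]⟩, if_neg (by norm_num)]
        simp [pvPat, ih 2 (by norm_num) (by norm_num)]
      · rw [pvLineDone, if_neg (by norm_num), if_neg (by norm_num),
          if_neg (by rw [hg]; simp; exact fun h => hcc h.symm)]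
        simp [pvPat, List.isPrefixOf, Ne.symm hcc]
    · -- j = 2
      have hg : PySem.List.pyGet? pvPat (2 : Int) = some 'a' := by decide
      by_cases hcc : c = 'a'
      · subst hcc
        rw [pvLineDone, if_neg (by norm_num), if_neg (by norm_num),
          if_pos ⟨by norm_num, by rw [hg]⟩, if_neg (by norm_num)]
        simp [pvPat, ih 3 (by norm_num) (by norm_num)]
      · rw [pvLineDone, if_neg (by norm_num), if_neg (by norm_num),
          if_neg (by rw [hg]; simp; exact fun h => hcc h.symm)]
        simp [pvPat, List.isPrefixOf, Ne.symm hcc]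
    · -- j = 3
      have hg : PySem.List.pyGet? pvPat (3 : Int) = some 'g' := by decide
      by_cases hcc : c = 'g'
      · subst hcc
        rw [pvLineDone, if_neg (by norm_num), if_neg (by norm_num),
          if_pos ⟨by norm_num, by rw [hg]⟩, if_neg (by norm_num)]
        simp [pvPat, ih 4 (by norm_num) (by norm_num)]
      · rw [pvLineDone, if_neg (by norm_num), if_neg (by norm_num),
          if_neg (by rw [hg]; simp; exact fun h => hcc h.symm)]
        simp [pvPat, List.isPrefixOf, Ne.symm hcc]
    · -- j = 4
      have hg : PySem.List.pyGet? pvPat (4 : Int) = some 'm' := by decide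
      by_cases hcc : c = 'm'
      · subst hcc
        rw [pvLineDone, if_neg (by norm_num), if_neg (by norm_num),
          if_pos ⟨by norm_num, by rw [hg]⟩, if_neg (by norm_num)]
        simp [pvPat, ih 5 (by norm_num) (by norm_num)]
      · rw [pvLineDone, if_neg (by norm_num), if_neg (by norm_num),
          if_neg (by rw [hg]; simp; exact fun h => hcc h.symm)]
        simp [pvPat, List.isPrefixOf, Ne.symm hcc]
    · -- j = 5
      have hg : PySem.List.pyGet? pvPat (5 : Int) = some 'a' := by decide
      by_cases hcc : c = 'a'
      · subst hcc
        rw [pvLineDone, if_neg (by norm_num), if_neg (by norm_num),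
          if_pos ⟨by norm_num, by rw [hg]⟩, if_pos (by norm_num)]
        simp [pvPat, List.isPrefixOf]
      · rw [pvLineDone, if_neg (by norm_num), if_neg (by norm_num),
          if_neg (by rw [hg]; simp; exact fun h => hcc h.symm)]
        simp [pvPat, List.isPrefixOf, Ne.symm hcc]

theorem pvLineDone_zero (l : List Char) :
    pvLineDone 0 l = pvPat.isPrefixOf (PySem.Chars.lstrip l) := by
  induction l with
  | nil => simp [pvLineDone, PySem.Chars.lstrip, pvPat]
  | cons c rest ih =>
    by_cases hws : PySem.Chars.isspace c = true
    · simp [pvLineDone, hws, PySem.Chars.lstrip, ih]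
    · have hg : PySem.List.pyGet? pvPat (0 : Int) = some 'p' := by decide
      by_cases hp : c = 'p'
      · subst hp
        rw [pvLineDone, if_neg (by norm_num), if_neg (by simp [hws]),
          if_pos ⟨by norm_num, by rw [hg]⟩, if_neg (by norm_num)]
        simp [PySem.Chars.lstrip, hws, pvPat,
          pvLineDone_mid rest 1 (by norm_num) (by norm_num)]
      · rw [pvLineDone, if_neg (by norm_num), if_neg (by simp [hws]),
          if_neg (by rw [hg]; simp; exact fun h => hp h.symm)]
        simp [PySem.Chars.lstrip, hws, pvPat, List.isPrefixOf, Ne.symm hp]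

-- "pragma" has a non-whitespace last character, so the trailing strip cannot disturb it
theorem pvPrefix_rstrip (m : List Char) :
    pvPat.isPrefixOf (PySem.Chars.rstrip m) = pvPat.isPrefixOf m := by
  have hsub : PySem.Chars.rstrip m <+: m := by
    rw [PySem.Chars.rstrip]
    conv_rhs => rw [← List.reverse_reverse m]
    exact List.reverse_prefix.mpr (List.dropWhile_suffix _)
  by_cases hm : pvPat <+: m
  · obtain ⟨t, ht⟩ := hm
    have key : pvPat <+: PySem.Chars.rstrip m := by
      rw [← ht, PySem.Chars.rstrip, List.reverse_append, List.dropWhile_append]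
      by_cases he : (List.dropWhile PySem.Chars.isspace t.reverse).isEmpty
      · rw [if_pos he]
        have hpp : List.dropWhile PySem.Chars.isspace pvPat.reverse = pvPat.reverse := by decide
        rw [hpp, List.reverse_reverse]
      · rw [if_neg he, List.reverse_append, List.reverse_reverse]
        exact List.prefix_append _ _
    have hm' : pvPat <+: m := ⟨t, ht⟩
    rw [List.isPrefixOf_iff_prefix.mpr key, List.isPrefixOf_iff_prefix.mpr hm']
  · have h2 : ¬ pvPat <+: PySem.Chars.rstrip m := fun h => hm (h.trans hsub)
    rw [Bool.eq_false_iff.mpr (fun hb => h2 (List.isPrefixOf_iff_prefix.mp hb)),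
      Bool.eq_false_iff.mpr (fun hb => hm (List.isPrefixOf_iff_prefix.mp hb))]

theorem pvIsPragma_eq_lstrip (l : List Char) :
    pvIsPragma l = pvPat.isPrefixOf (PySem.Chars.lstrip l) := by
  have hpat : "pragma".toList = pvPat := by decide
  rw [pvIsPragma, PySem.Chars.startswith, hpat, PySem.Chars.strip, pvPrefix_rstrip]

-- the number of pragma-completions pvScan still makes from state j
def pvCountFrom (j : Int) (cs : List Char) : Nat :=
  (if pvLineDone j (pvLines cs).headI then 1 else 0) + ((pvLines cs).tail.countP pvIsPragma)

theorem pvCountFrom_zero (cs : List Char) :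
    pvCountFrom 0 cs = (pvLines cs).countP pvIsPragma := by
  obtain ⟨L, Ls, hLL⟩ : ∃ L Ls, pvLines cs = L :: Ls := by
    cases hr : pvLines cs with
    | nil => exact absurd hr (pvLines_ne_nil cs)
    | cons L Ls => exact ⟨L, Ls, rfl⟩
  rw [pvCountFrom, pvLineDone_zero, ← pvIsPragma_eq_lstrip, hLL, List.countP_cons]
  cases h : pvIsPragma L <;> (simp [h]; try omega)

theorem pvScan_eq (cs : List Char) : ∀ (found j : Int), (found = 0 ∨ found = 1) →
    pvScan cs found j = if 2 ≤ found + pvCountFrom j cs then 1 else 0 := by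
  induction cs with
  | nil =>
    intro found j hf
    have : pvCountFrom j [] = 0 := by
      simp [pvCountFrom, pvLines, pvLineDone]
    rw [pvScan, this]
    rcases hf with rfl | rfl <;> norm_num
  | cons c cs ih =>
    intro found j hf
    obtain ⟨L, Ls, hLL⟩ : ∃ L Ls, pvLines cs = L :: Ls := by
      cases hr : pvLines cs with
      | nil => exact absurd hr (pvLines_ne_nil cs)
      | cons L Ls => exact ⟨L, Ls, rfl⟩
    by_cases hc : c = '\n'
    · subst hc
      have hcc : pvCountFrom 0 cs = pvCountFrom j ('\n' :: cs) := by
        rw [pvCountFrom_zero, pvCountFrom]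
        simp [pvLines, pvLineDone]
      rw [pvScan, if_pos rfl, ih found 0 hf, hcc]
    · have hcount : pvCountFrom j (c :: cs)
          = (if pvLineDone j (c :: L) then 1 else 0) + Ls.countP pvIsPragma := by
        rw [pvCountFrom]
        simp [pvLines, hc, hLL]
      have hcount' : ∀ (j' : Int), pvCountFrom j' cs
          = (if pvLineDone j' L then 1 else 0) + Ls.countP pvIsPragma := by
        intro j'
        rw [pvCountFrom, hLL]
        simp
      rw [pvScan, if_neg hc]
      by_cases hneg : j < 0
      · rw [if_pos hneg, ih found j hf, hcount, hcount']
        rw [pvLineDone_neg _ _ hneg, pvLineDone_neg _ _ hneg]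
      · rw [if_neg hneg]
        by_cases hws : j = 0 ∧ PySem.Chars.isspace c
        · rw [if_pos hws, ih found j hf, hcount, hcount']
          have : pvLineDone j (c :: L) = pvLineDone j L := by
            rw [pvLineDone, if_neg hneg, if_pos hws]
          rw [this]
        · rw [if_neg hws]
          by_cases hmatch : j < 6 ∧ PySem.List.pyGet? pvPat j = some c
          · rw [if_pos hmatch]
            have hdone : pvLineDone j (c :: L)
                = (if j + 1 = 6 then true else pvLineDone (j + 1) L) := by
              rw [pvLineDone, if_neg hneg, if_neg hws, if_pos hmatch]
            by_cases h6 : j + 1 = 6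
            · rw [if_pos h6]
              rw [hcount, hdone, if_pos h6, if_pos rfl]
              rcases hf with rfl | rfl
              · norm_num
                rw [ih 1 (-1) (Or.inr rfl), hcount' (-1), pvLineDone_neg _ _ (by norm_num)]
                simp
              · norm_num
                omega
            · rw [if_neg h6, ih found (j + 1) hf, hcount, hcount' (j + 1), hdone, if_neg h6]
          · rw [if_neg hmatch, ih found (-1) hf, hcount, hcount' (-1),
              pvLineDone_neg _ _ (by norm_num)]
            have : pvLineDone j (c :: L) = false := by
              rw [pvLineDone, if_neg hneg, if_neg hws, if_neg hmatch]
            rw [this]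

theorem pvFindSecond_eq (xs : List (List Char)) :
    pvFindSecond xs = if 1 ≤ xs.countP pvIsPragma then 1 else 0 := by
  induction xs with
  | nil => simp [pvFindSecond]
  | cons l rest ih =>
    rw [pvFindSecond, List.countP_cons]
    cases pvIsPragma l
    · simp [ih]
    · simp

theorem pvFindFirst_eq (xs : List (List Char)) :
    pvFindFirst xs = if 2 ≤ xs.countP pvIsPragma then 1 else 0 := by
  induction xs with
  | nil => simp [pvFindFirst]
  | cons l rest ih =>
    rw [pvFindFirst, List.countP_cons]
    cases pvIsPragma l
    · simp [ih]
    · rw [pvFindSecond_eq]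
      by_cases h1 : 1 ≤ rest.countP pvIsPragma <;> simp [h1]

-- ===== VERDICT (by name: the statement is the Claim_ definition above) =====
theorem detection_spec : Claim_equal_detection := by
  intro data _
  unfold Spec_detection detection detection_alt
  rw [pvSplitOn_eq, pvFindFirst_eq, pvScan_eq data.toList 0 0 (Or.inl rfl), pvCountFrom_zero]
  norm_num
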